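-- pv_equiv track=rewrite | github.com/NatthapeeSriarunluck/ICCS101 | Assignment 6/eto.py | eto
-- ===== SOURCE A (Python) =====
-- def eto(lst: list[int]) -> list[int]:
--     if lst == []:
--         return []
--     else:
--         if lst[0] % 2 == 0:
--             return [lst[0]] + eto(lst[1:])
--         else:
--             return eto(lst[1:]) + [lst[0]]
-- ===== SOURCE B (Python) =====
-- def eto(lst: list[int]) -> list[int]:
--     evens = []
--     odds = []
--     for x in lst:
--         if x % 2 == 0:
--             evens.append(x)
--         else:
--             odds.append(x)
--     return evens + odds[::-1]
-- ===== Notes on version B (the rewrite author's own statement) =====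
-- stated objective: faster
-- what changed: Replaced the quadratic recursion (which rebuilds a slice and concatenates a list at every element) with a single iterative pass collecting evens and odds into two accumulators, returning evens + reversed odds.
import Mathlib
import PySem

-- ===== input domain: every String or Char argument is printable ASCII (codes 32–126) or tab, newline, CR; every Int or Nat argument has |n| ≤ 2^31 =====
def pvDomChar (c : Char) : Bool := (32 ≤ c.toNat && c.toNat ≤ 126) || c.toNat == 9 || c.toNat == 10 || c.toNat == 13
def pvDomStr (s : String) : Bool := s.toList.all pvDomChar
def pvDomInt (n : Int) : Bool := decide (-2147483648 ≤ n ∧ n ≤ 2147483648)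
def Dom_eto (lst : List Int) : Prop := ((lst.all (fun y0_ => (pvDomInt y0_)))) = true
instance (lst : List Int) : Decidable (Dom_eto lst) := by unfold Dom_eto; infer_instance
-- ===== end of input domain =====

-- B replaces A's quadratic recursion by one linear pass with two accumulators (evens, odds), returning evens ++ odds reversed.

-- shared predicate: Python's 'x % 2 == 0'
def pyEven (x : Int) : Bool := PySem.Int.mod x 2 == 0

-- ===== PORT A =====
-- literal port of A: recursion on the list; lst[1:] is the tail, '+' is append
def eto (lst : List Int) : List Int :=
  match lst with
  | [] => []
  | x :: xs => if pyEven x then [x] ++ eto xs else eto xs ++ [x]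

-- ===== PORT B =====
-- literal port of B: one foldl appending each element to the evens or odds accumulator, then evens ++ odds[::-1]
def eto_alt (lst : List Int) : List Int :=
  let p := lst.foldl (fun (acc : List Int × List Int) x =>
    if pyEven x then (acc.1 ++ [x], acc.2) else (acc.1, acc.2 ++ [x])) ([], [])
  p.1 ++ p.2.reverse

-- ===== PRECONDITION & SPEC =====
def Spec_eto (lst : List Int) (out : List Int) : Prop := out = eto_alt lst
instance (lst : List Int) (out : List Int) : Decidable (Spec_eto lst out) := by unfold Spec_eto; infer_instance

-- ===== CLAIM (what is proved, stated in full; the proofs are below) =====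
def Claim_equal_eto : Prop := ∀ (lst : List Int), Dom_eto lst → Spec_eto lst (eto lst)

-- ===== LEMMAS AND PROOFS =====
lemma eto_loop_acc (lst : List Int) (e o : List Int) :
    lst.foldl (fun (acc : List Int × List Int) x =>
      if pyEven x then (acc.1 ++ [x], acc.2) else (acc.1, acc.2 ++ [x])) (e, o)
    = (e ++ lst.filter pyEven, o ++ lst.filter (fun x => ! pyEven x)) := by
  induction lst generalizing e o with
  | nil => simp
  | cons x xs ih =>
    cases h : pyEven x <;> simp [h, ih]

lemma eto_eq_filters (lst : List Int) :
    eto lst = lst.filter pyEven ++ (lst.filter (fun x => ! pyEven x)).reverse := by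
  induction lst with
  | nil => simp [eto]
  | cons x xs ih =>
    cases h : pyEven x <;> simp [eto, h, ih]

-- ===== VERDICT (by name: the statement is the Claim_ definition above) =====
theorem eto_spec : Claim_equal_eto := by
  intro lst _
  unfold Spec_eto eto_alt
  rw [eto_loop_acc, eto_eq_filters]
  simp
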